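-- pv_equiv track=rewrite | github.com/rdnve/finavis | finavis/utils/functions.py | text_to_label
-- ===== SOURCE A (Python) =====
-- import string
-- import typing as ty
--
-- def text_to_label(value: str) -> ty.Optional[str]:
--     """Some `Hello world` convert to `hello_world`"""
--
--     result: ty.List[str] = list()
--
--     keys: ty.Set[str] = set(list(string.ascii_lowercase) + list(string.digits))
--     for key in value.strip().lower():
--         if key == "%":
--             result.append("percent")
--             continue
--         if key in keys:
--             result.append(key)
--         else:
--             if len(result) == 0:
--                 result.append("_")
--             elif "_" != result[-1]:
--                 result.append("_")
--
--     if len(result) == 0: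
--         return None
--     else:
--         line: str = "".join(result)
--
--     if line.startswith("_"):
--         line = line[1 : len(line)]
--
--     if line.endswith("_"):
--         line = line[0 : len(line) - 1]
--
--     if line.startswith("52w"):
--         line = line.replace("52w", "ttm")
--
--     return line
-- ===== SOURCE B (Python) =====
-- import re
--
-- def text_to_label(value):
--     s = value.strip().lower()
--     if not s:
--         return None
--     s = s.replace("%", "percent")
--     s = re.sub(r"[^a-z0-9]+", "_", s).strip("_")
--     if s.startswith("52w"):
--         s = s.replace("52w", "ttm")
--     return s
-- ===== Notes on version B (the rewrite author's own statement) =====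
-- stated objective: idiomatic
-- what changed: Replaces A's per-character state machine (list accumulator with last-element checks and one-sided boundary trims) by regex-style substitution: expand the percent sign to its word, collapse each run of characters outside the lowercase-alphanumeric class to a single underscore with re.sub, and strip underscores from both ends.
import Mathlib
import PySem

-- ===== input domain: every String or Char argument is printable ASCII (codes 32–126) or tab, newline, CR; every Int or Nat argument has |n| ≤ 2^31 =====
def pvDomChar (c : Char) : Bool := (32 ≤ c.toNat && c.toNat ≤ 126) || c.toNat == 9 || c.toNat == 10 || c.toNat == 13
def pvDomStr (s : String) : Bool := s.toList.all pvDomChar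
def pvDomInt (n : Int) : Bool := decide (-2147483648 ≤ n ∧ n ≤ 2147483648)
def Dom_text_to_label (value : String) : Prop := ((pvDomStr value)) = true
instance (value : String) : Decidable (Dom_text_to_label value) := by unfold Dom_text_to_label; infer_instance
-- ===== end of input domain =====

-- B rewrites A's per-character state machine as regex-style substitution (collapse runs of invalid chars via re.sub, strip underscores at both ends); idiomatic and measured faster by a constant factor.

-- ===== PORT A =====
def text_to_label (value : String) : Option String :=
  let keys : PySem.Set Char := PySem.Set.ofList ("abcdefghijklmnopqrstuvwxyz0123456789".toList)
  let result : List String :=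
    (PySem.Str.lower (PySem.Str.strip value)).toList.foldl
      (fun (result : List String) key =>
        if key == '%' then result ++ ["percent"]
        else if keys.contains key then result ++ [String.ofList [key]]
        else if result.length == 0 then result ++ ["_"]
        else if PySem.List.pyGet? result (-1) ≠ some "_" then result ++ ["_"]
        else result) []
  if result.length == 0 then none
  else
    let line : String := PySem.Str.join "" result
    let line := if PySem.Str.startswith line "_" then PySem.Str.slice line (some 1) (some (PySem.Str.len line)) else line
    let line := if PySem.Str.endswith line "_" then PySem.Str.slice line (some 0) (some (PySem.Str.len line - 1)) else line
    let line := if PySem.Str.startswith line "52w" then PySem.Str.replace line "52w" "ttm" else line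
    some line

-- ===== PORT B =====
-- regex character class [a-z0-9]
def pvAlnum (c : Char) : Bool := ('a' ≤ c && c ≤ 'z') || ('0' ≤ c && c ≤ '9')

-- hand port of re.sub(r"[^a-z0-9]+", "_", s): each maximal run of chars outside [a-z0-9]
-- becomes a single '_' (exact for this regex/replacement)
def pvSub : List Char → List Char
  | [] => []
  | c :: t =>
    if pvAlnum c then c :: pvSub t
    else '_' :: pvSub (t.dropWhile (fun d => !pvAlnum d))
termination_by l => l.length
decreasing_by
  · simp
  · exact Nat.lt_of_le_of_lt (List.length_dropWhile_le _ t) (by simp)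

def text_to_label_alt (value : String) : Option String :=
  let s := PySem.Str.lower (PySem.Str.strip value)
  if s.toList.isEmpty then none
  else
    let s := PySem.Str.replace s "%" "percent"
    let t := PySem.Str.stripChars (String.ofList (pvSub s.toList)) "_"
    let t := if PySem.Str.startswith t "52w" then PySem.Str.replace t "52w" "ttm" else t
    some t

-- ===== PRECONDITION & SPEC =====
def Spec_text_to_label (value : String) (out : Option String) : Prop := out = text_to_label_alt value
instance (value : String) (out : Option String) : Decidable (Spec_text_to_label value out) := by unfold Spec_text_to_label; infer_instance

-- ===== CLAIM (what is proved, stated in full; the proofs are below) =====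
def Claim_equal_text_to_label : Prop := ∀ (value : String), Dom_text_to_label value → Spec_text_to_label value (text_to_label value)

-- ===== LEMMAS AND PROOFS =====

-- relation: no two adjacent underscores
def pvR (a b : Char) : Prop := ¬(a = '_' ∧ b = '_')

-- '%' → "percent" expansion at character level
def pvExpand (cs : List Char) : List Char := cs.flatMap (fun c => if c == '%' then "percent".toList else [c])

-- the characters of A's joined result list
def pvJ (acc : List String) : List Char := (acc.map String.toList).flatten

theorem pvJ_append (acc : List String) (x : String) : pvJ (acc ++ [x]) = pvJ acc ++ x.toList := by
  simp [pvJ]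

set_option maxRecDepth 4096 in
theorem pv_set_eval : PySem.Set.ofList ("abcdefghijklmnopqrstuvwxyz0123456789".toList) = "abcdefghijklmnopqrstuvwxyz0123456789".toList := by decide

theorem pv_keys (c : Char) : PySem.Set.contains ("abcdefghijklmnopqrstuvwxyz0123456789".toList) c = pvAlnum c := by
  rw [PySem.Set.contains, List.contains_eq_mem]
  have hinj : ∀ d : Char, (c = d) ↔ c.toNat = d.toNat := by
    intro d
    exact ⟨fun h => by rw [h], fun h => Char.ext (UInt32.toNat_inj.mp h)⟩
  have hle : ∀ d e : Char, (d ≤ e) ↔ d.toNat ≤ e.toNat := by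
    intro d e; rw [Char.le_def, UInt32.le_iff_toNat_le]; exact Iff.rfl
  have e1 : (c ∈ "abcdefghijklmnopqrstuvwxyz0123456789".toList) ↔
      ((97 ≤ c.toNat ∧ c.toNat ≤ 122) ∨ (48 ≤ c.toNat ∧ c.toNat ≤ 57)) := by
    rw [show ("abcdefghijklmnopqrstuvwxyz0123456789".toList) = ['a','b','c','d','e','f','g','h','i','j','k','l','m','n','o','p','q','r','s','t','u','v','w','x','y','z','0','1','2','3','4','5','6','7','8','9'] from rfl]
    simp only [List.mem_cons, List.not_mem_nil, or_false, hinj, show ('a').toNat = 97 from rfl, show ('b').toNat = 98 from rfl, show ('c').toNat = 99 from rfl, show ('d').toNat = 100 from rfl, show ('e').toNat = 101 from rfl, show ('f').toNat = 102 from rfl, show ('g').toNat = 103 from rfl, show ('h').toNat = 104 from rfl, show ('i').toNat = 105 from rfl, show ('j').toNat = 106 from rfl, show ('k').toNat = 107 from rfl, show ('l').toNat = 108 from rfl, show ('m').toNat = 109 from rfl, show ('n').toNat = 110 from rfl, show ('o').toNat = 111 from rfl, show ('p').toNat = 112 from rfl, show ('q').toNat = 113 from rfl, show ('r').toNat = 114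 from rfl, show ('s').toNat = 115 from rfl, show ('t').toNat = 116 from rfl, show ('u').toNat = 117 from rfl, show ('v').toNat = 118 from rfl, show ('w').toNat = 119 from rfl, show ('x').toNat = 120 from rfl, show ('y').toNat = 121 from rfl, show ('z').toNat = 122 from rfl, show ('0').toNat = 48 from rfl, show ('1').toNat = 49 from rfl, show ('2').toNat = 50 from rfl, show ('3').toNat = 51 from rfl, show ('4').toNat = 52 from rfl, show ('5').toNat = 53 from rfl, show ('6').toNat = 54 from rfl, show ('7').toNat = 55 from rfl, show ('8').toNat = 56 from rfl, show ('9').toNat = 57 from rfl]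
    omega
  have e2 : pvAlnum c = true ↔ ((97 ≤ c.toNat ∧ c.toNat ≤ 122) ∨ (48 ≤ c.toNat ∧ c.toNat ≤ 57)) := by
    simp only [pvAlnum, Bool.or_eq_true, Bool.and_eq_true, decide_eq_true_iff, hle, show ('a').toNat = 97 from rfl, show ('z').toNat = 122 from rfl, show ('0').toNat = 48 from rfl, show ('9').toNat = 57 from rfl]
  cases hc : pvAlnum c
  · simp only [decide_eq_false_iff_not]
    rw [e1, ← e2, hc]; simp
  · simp only [decide_eq_true_iff]
    rw [e1, ← e2, hc]

theorem pv_pyGet_last (xs : List String) : PySem.List.pyGet? xs (-1) = xs.getLast? := by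
  cases xs with
  | nil => rfl
  | cons a t =>
    simp [PySem.List.pyGet?, PySem.List.pyIdx?, List.getLast?_eq_getElem?]

theorem pv_join (parts : List (List Char)) : PySem.Chars.join [] parts = parts.flatten := by
  simp [PySem.Chars.join, List.intercalate]
  induction parts with
  | nil => simp
  | cons x l ih => cases l <;> simp_all [List.intersperse]

theorem pvSub_nil : pvSub [] = [] := by rw [pvSub]

theorem pvSub_pos (c : Char) (t : List Char) (h : pvAlnum c = true) : pvSub (c :: t) = c :: pvSub t := by
  rw [pvSub]; simp [h]

theorem pvSub_neg (c : Char) (t : List Char) (h : pvAlnum c = false) :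
    pvSub (c :: t) = '_' :: pvSub (t.dropWhile (fun d => !pvAlnum d)) := by
  rw [pvSub]; simp [h]

theorem pvSub_percent (xs : List Char) : pvSub ("percent".toList ++ xs) = "percent".toList ++ pvSub xs := by
  show pvSub ('p'::'e'::'r'::'c'::'e'::'n'::'t'::xs) = 'p'::'e'::'r'::'c'::'e'::'n'::'t':: pvSub xs
  rw [pvSub_pos _ _ (by decide), pvSub_pos _ _ (by decide), pvSub_pos _ _ (by decide),
      pvSub_pos _ _ (by decide), pvSub_pos _ _ (by decide), pvSub_pos _ _ (by decide),
      pvSub_pos _ _ (by decide)]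

theorem pv_go (fuel : Nat) : ∀ (l acc : List Char), l.length ≤ fuel →
    PySem.Chars.replace.go ['%'] "percent".toList fuel l acc = acc.reverse ++ pvExpand l := by
  induction fuel with
  | zero =>
    intro l acc h
    have hl : l = [] := by cases l <;> simp_all
    subst hl
    rw [PySem.Chars.replace.go]
    simp [pvExpand]
  | succ n ih =>
    intro l acc h
    cases l with
    | nil => rw [PySem.Chars.replace.go] <;> simp [pvExpand]
    | cons c t =>
      rw [PySem.Chars.replace.go]
      by_cases hc : c = '%'
      · subst hc
        rw [if_pos (show (['%'].isPrefixOf ('%' :: t)) = true by simp [List.isPrefixOf])]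
        rw [show List.drop (['%'].length) ('%' :: t) = t from rfl]
        rw [ih _ _ (by simp at h ⊢; omega)]
        simp [pvExpand]
      · have hpre : (['%'].isPrefixOf (c :: t)) = ('%' == c) := by cases t <;> simp [List.isPrefixOf]
        rw [if_neg (show ¬((['%'].isPrefixOf (c :: t)) = true) by rw [hpre]; simp; exact fun hh => hc hh.symm)]
        rw [ih _ _ (by simp at h ⊢; omega)]
        simp [pvExpand, hc]

theorem pv_replace (cs : List Char) : PySem.Chars.replace cs ['%'] ("percent".toList) = pvExpand cs := by
  rw [PySem.Chars.replace]
  rw [if_neg (by simp)]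
  rw [pv_go cs.length cs [] le_rfl]
  simp

theorem pv_dropWhile_head (p : Char → Bool) (l : List Char) (c : Char) (t : List Char)
    (h : l.dropWhile p = c :: t) : p c = false := by
  induction l with
  | nil => simp at h
  | cons a l ih =>
    rw [List.dropWhile_cons] at h
    by_cases ha : p a
    · simp [ha] at h; exact ih h
    · simp [ha] at h; rw [h.1] at ha; simp [ha]

theorem pv_drop_head (xs : List Char) : (pvSub (xs.dropWhile (fun d => !pvAlnum d))).head? ≠ some '_' := by
  cases h : xs.dropWhile (fun d => !pvAlnum d) with
  | nil => simp [pvSub_nil]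
  | cons c t =>
    have hp : (!pvAlnum c) = false := pv_dropWhile_head _ xs c t h
    rw [pvSub_pos c t (by simpa using hp)]
    intro hcon
    simp at hcon
    subst hcon
    simp [pvAlnum] at hp

theorem pv_chain (xs : List Char) : List.IsChain pvR (pvSub xs) := by
  induction xs using pvSub.induct with
  | case1 => rw [pvSub_nil]; exact List.IsChain.nil
  | case2 c t h ih =>
    rw [pvSub_pos c t h]
    rw [List.isChain_cons]
    constructor
    · intro y _ hcon
      rcases hcon with ⟨h1, _⟩
      subst h1
      simp [pvAlnum] at h
    · exact ih
  | case3 c t h ih =>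
    rw [pvSub_neg c t (by simpa using h)]
    rw [List.isChain_cons]
    constructor
    · intro y hy hcon
      rcases hcon with ⟨_, h2⟩
      subst h2
      exact pv_drop_head t (by rw [hy])
    · exact ih

theorem pv_chain_rev (l : List Char) (h : List.IsChain pvR l) : List.IsChain pvR l.reverse := by
  rw [List.isChain_reverse]
  exact h.imp (fun a b hab => fun ⟨h1, h2⟩ => hab ⟨h2, h1⟩)

theorem pv_dropU (l : List Char) (h : List.IsChain pvR l) :
    l.dropWhile (fun c => (['_'] : List Char).contains c) = if l.head? = some '_' then l.tail else l := by
  cases l with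
  | nil => simp
  | cons c t =>
    by_cases hc : c = '_'
    · subst hc
      simp only [List.head?_cons, List.tail_cons]
      rw [if_pos (by simp)]
      rw [List.dropWhile_cons]
      rw [if_pos (show ((['_'] : List Char).contains '_') = true from rfl)]
      cases ht : t with
      | nil => simp
      | cons d t' =>
        rw [List.dropWhile_cons]
        have hd : d ≠ '_' := by
          rw [ht, List.isChain_cons] at h
          have := h.1 d (by simp)
          intro hdd; exact this ⟨rfl, hdd⟩
        rw [if_neg (by simp [hd])]
    · simp only [List.head?_cons]
      rw [if_neg (by simp [hc])]
      rw [List.dropWhile_cons]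
      rw [if_neg (by simp [hc])]

theorem pv_revtail (l : List Char) : l.reverse.tail.reverse = l.dropLast := by
  induction l using List.reverseRecOn <;> simp

theorem pv_strip (l : List Char) (h : List.IsChain pvR l) :
    PySem.Chars.stripChars l ['_'] =
      (if ((if l.head? = some '_' then l.tail else l)).getLast? = some '_'
        then ((if l.head? = some '_' then l.tail else l)).dropLast
        else (if l.head? = some '_' then l.tail else l)) := by
  have hch1 : List.IsChain pvR (if l.head? = some '_' then l.tail else l) := by
    by_cases hc : l.head? = some '_'
    · rw [if_pos hc]; exact h.tail
    · rw [if_neg hc]; exact h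
  show (List.dropWhile _ (List.dropWhile _ l).reverse).reverse = _
  rw [pv_dropU l h]
  rw [pv_dropU _ (pv_chain_rev _ hch1)]
  by_cases hg : (if l.head? = some '_' then l.tail else l).getLast? = some '_'
  · rw [if_pos hg, if_pos (by rw [List.head?_reverse]; exact hg)]
    exact pv_revtail _
  · rw [if_neg hg, if_neg (by rw [List.head?_reverse]; exact hg)]
    simp

def pvStepA : List String → Char → List String := fun result key =>
  if key == '%' then result ++ ["percent"]
  else if (PySem.Set.ofList ("abcdefghijklmnopqrstuvwxyz0123456789".toList) : PySem.Set Char).contains key then result ++ [String.ofList [key]]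
  else if result.length == 0 then result ++ ["_"]
  else if PySem.List.pyGet? result (-1) ≠ some "_" then result ++ ["_"]
  else result

theorem pvStep_percent (acc : List String) : pvStepA acc '%' = acc ++ ["percent"] := by
  simp [pvStepA]

theorem pvStep_alnum (acc : List String) (c : Char) (hc : c ≠ '%') (ha : pvAlnum c = true) :
    pvStepA acc c = acc ++ [String.ofList [c]] := by
  simp only [pvStepA, pv_set_eval, pv_keys]
  simp [hc, ha]

theorem pvStep_inval_nil (c : Char) (hc : c ≠ '%') (ha : pvAlnum c = false) :
    pvStepA [] c = ["_"] := by
  simp only [pvStepA, pv_set_eval, pv_keys]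
  simp [hc, ha]

theorem pvStep_inval_app (acc : List String) (c : Char) (hc : c ≠ '%') (ha : pvAlnum c = false)
    (hne : acc ≠ []) (hl : acc.getLast? ≠ some "_") : pvStepA acc c = acc ++ ["_"] := by
  simp only [pvStepA, pv_set_eval, pv_keys, pv_pyGet_last]
  simp [hc, ha, hne, hl]

theorem pvStep_inval_keep (acc : List String) (c : Char) (hc : c ≠ '%') (ha : pvAlnum c = false)
    (hne : acc ≠ []) (hl : acc.getLast? = some "_") : pvStepA acc c = acc := by
  simp only [pvStepA, pv_set_eval, pv_keys, pv_pyGet_last]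
  simp [hc, ha, hne, hl]

theorem pv_main (cs : List Char) : ∀ (acc : List String),
    pvJ (cs.foldl pvStepA acc) =
      pvJ acc ++ (if acc.getLast? = some "_" then pvSub ((pvExpand cs).dropWhile (fun d => !pvAlnum d)) else pvSub (pvExpand cs)) := by
  induction cs with
  | nil =>
    intro acc
    simp only [List.foldl_nil]
    rw [show pvExpand [] = [] from rfl]
    by_cases hl : acc.getLast? = some "_" <;> simp [hl, pvSub_nil]
  | cons c t ih =>
    intro acc
    rw [List.foldl_cons]
    by_cases hc : c = '%'
    · subst hc
      rw [pvStep_percent, ih]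
      rw [show (acc ++ ["percent"]).getLast? = some "percent" from by simp]
      rw [if_neg (by simp)]
      have hexp : pvExpand ('%' :: t) = "percent".toList ++ pvExpand t := by simp [pvExpand]
      rw [hexp, pvJ_append]
      have hdw : ("percent".toList ++ pvExpand t).dropWhile (fun d => !pvAlnum d) = "percent".toList ++ pvExpand t := by
        rw [show ("percent".toList ++ pvExpand t) = 'p' :: ("ercent".toList ++ pvExpand t) from rfl]
        rw [List.dropWhile_cons, if_neg (by decide)]
      by_cases hl : acc.getLast? = some "_"
      · rw [if_pos hl, hdw, pvSub_percent]; simp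
      · rw [if_neg hl, pvSub_percent]; simp
    · have hexp : pvExpand (c :: t) = c :: pvExpand t := by simp [pvExpand, hc]
      by_cases ha : pvAlnum c
      · rw [pvStep_alnum acc c hc ha, ih]
        have hcu : c ≠ '_' := by intro hh; subst hh; simp [pvAlnum] at ha
        rw [show (acc ++ [String.ofList [c]]).getLast? = some (String.ofList [c]) from by simp]
        rw [if_neg (by
          intro hh
          apply hcu
          have := congrArg String.toList (Option.some.inj hh)
          simpa using this)]
        rw [hexp, pvJ_append]
        have hdwc : (c :: pvExpand t).dropWhile (fun d => !pvAlnum d) = c :: pvExpand t := by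
          rw [List.dropWhile_cons, if_neg (by simp [ha])]
        by_cases hl : acc.getLast? = some "_"
        · rw [if_pos hl, hdwc, pvSub_pos _ _ ha]; simp
        · rw [if_neg hl, pvSub_pos _ _ ha]; simp
      · have ha' : pvAlnum c = false := by simp_all
        have hsub : pvSub (c :: pvExpand t) = '_' :: pvSub ((pvExpand t).dropWhile (fun d => !pvAlnum d)) := pvSub_neg _ _ ha'
        have hdw : (c :: pvExpand t).dropWhile (fun d => !pvAlnum d) = (pvExpand t).dropWhile (fun d => !pvAlnum d) := by
          rw [List.dropWhile_cons, if_pos (by simp [ha'])]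
        rcases heq : acc.getLast? with _ | s
        · have hacc : acc = [] := List.getLast?_eq_none_iff.mp heq
          subst hacc
          rw [pvStep_inval_nil c hc ha', ih]
          rw [show (["_"] : List String).getLast? = some "_" from rfl, if_pos rfl]
          rw [if_neg (by simp), hexp, hsub]
          simp [pvJ]
        · have hne : acc ≠ [] := by intro hh; rw [hh] at heq; simp at heq
          by_cases hs : s = "_"
          · subst hs
            rw [pvStep_inval_keep acc c hc ha' hne heq, ih]
            rw [if_pos heq, hexp, hdw, if_pos rfl]
          · have hlne : acc.getLast? ≠ some "_" := by rw [heq]; exact fun hh => hs (Option.some.inj hh)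
            rw [pvStep_inval_app acc c hc ha' hne hlne, ih]
            rw [hexp, hsub, pvJ_append]
            rw [if_neg (show ¬(some s = some "_") from fun hh => hs (Option.some.inj hh))]
            simp

theorem pv_sub_ne_nil (cs : List Char) (h : cs ≠ []) : pvSub (pvExpand cs) ≠ [] := by
  cases cs with
  | nil => exact absurd rfl h
  | cons c t =>
    have he : ∃ d r, pvExpand (c :: t) = d :: r := by
      by_cases hc : c = '%' <;> simp [pvExpand, hc]
    obtain ⟨d, r, he⟩ := he
    rw [he]
    by_cases hd : pvAlnum d
    · rw [pvSub_pos _ _ hd]; simp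
    · rw [pvSub_neg _ _ (by simp_all)]; simp

theorem pv_slice_tail (L : List Char) (h : L ≠ []) :
    PySem.List.slice L (some 1) (some (L.length : Int)) = L.tail := by
  have hn : 1 ≤ L.length := List.length_pos_iff.mpr h
  simp only [PySem.List.slice, PySem.List.clampIdx]
  rw [if_neg (by omega), if_neg (by omega)]
  rw [show min (Int.toNat 1) L.length = 1 from by omega]
  rw [show min (Int.toNat (L.length : Int)) L.length = L.length from by simp]
  rw [show List.drop 1 L = L.tail from by simp]
  apply List.take_of_length_le
  simp

theorem pv_slice_dropLast (L : List Char) (h : L ≠ []) :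
    PySem.List.slice L (some 0) (some ((L.length : Int) - 1)) = L.dropLast := by
  have hn : 1 ≤ L.length := List.length_pos_iff.mpr h
  simp only [PySem.List.slice, PySem.List.clampIdx]
  rw [if_neg (by omega), if_neg (by omega)]
  rw [show min (Int.toNat 0) L.length = 0 from by omega]
  rw [show min (Int.toNat ((L.length : Int) - 1)) L.length = L.length - 1 from by omega]
  rw [List.dropLast_eq_take]
  simp

theorem pv_prefix_single (l : List Char) (c : Char) : ((([c] : List Char).isPrefixOf l) = true) ↔ l.head? = some c := by
  cases l with
  | nil =>
    rw [show (([c] : List Char).isPrefixOf []) = false from rfl]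
    simp
  | cons a s =>
    rw [show (([c] : List Char).isPrefixOf (a :: s)) = (c == a && true) from rfl]
    simp only [Bool.and_true, beq_iff_eq, List.head?_cons, Option.some.injEq]
    exact eq_comm

theorem pv_len (s : String) : PySem.Str.len s = (s.toList.length : Int) := by
  have := PySem.Str.len_eq s
  simp_all

theorem pv_suffix_single (l : List Char) : (((['_'] : List Char).isSuffixOf l) = true) ↔ l.getLast? = some '_' := by
  rw [show ((['_'] : List Char).isSuffixOf l) = (['_'] : List Char).isPrefixOf l.reverse from rfl]
  rw [pv_prefix_single, List.head?_reverse]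

theorem pv_aux (w : String) (L : List Char) (hw : w.toList = L) (hch : List.IsChain pvR L) :
    (if PySem.Str.endswith (if PySem.Str.startswith w "_" then PySem.Str.slice w (some 1) (some (PySem.Str.len w)) else w) "_"
      then PySem.Str.slice (if PySem.Str.startswith w "_" then PySem.Str.slice w (some 1) (some (PySem.Str.len w)) else w) (some 0)
            (some (PySem.Str.len (if PySem.Str.startswith w "_" then PySem.Str.slice w (some 1) (some (PySem.Str.len w)) else w) - 1))
      else (if PySem.Str.startswith w "_" then PySem.Str.slice w (some 1) (some (PySem.Str.len w)) else w)).toList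
    = PySem.Chars.stripChars L ['_'] := by
  rw [pv_strip L hch]
  set w1 := if PySem.Str.startswith w "_" then PySem.Str.slice w (some 1) (some (PySem.Str.len w)) else w with hw1
  set M := if L.head? = some '_' then L.tail else L with hM
  have h1 : w1.toList = M := by
    rw [hw1, hM]
    by_cases hs0 : L.head? = some '_'
    · rw [if_pos (by rw [PySem.Str.startswith, show ("_" : String).toList = ['_'] from rfl, PySem.Chars.startswith, hw]; exact (pv_prefix_single _ _).mpr hs0)]
      rw [if_pos hs0]
      rw [PySem.Str.toList_slice, PySem.Chars.slice_eq_listSlice, pv_len, hw]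
      exact pv_slice_tail _ (by intro hh; rw [hh] at hs0; simp at hs0)
    · rw [if_neg (by rw [PySem.Str.startswith, show ("_" : String).toList = ['_'] from rfl, PySem.Chars.startswith, hw]; exact fun hcon => hs0 ((pv_prefix_single _ _).mp hcon))]
      rw [if_neg hs0]
      exact hw
  by_cases hs1 : M.getLast? = some '_'
  · rw [if_pos (by rw [PySem.Str.endswith, show ("_" : String).toList = ['_'] from rfl, PySem.Chars.endswith, h1]; exact (pv_suffix_single _).mpr hs1)]
    rw [if_pos hs1]
    rw [PySem.Str.toList_slice, PySem.Chars.slice_eq_listSlice, pv_len, h1]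
    exact pv_slice_dropLast _ (by intro hh; rw [hh] at hs1; simp at hs1)
  · rw [if_neg (by rw [PySem.Str.endswith, show ("_" : String).toList = ['_'] from rfl, PySem.Chars.endswith, h1]; exact fun hcon => hs1 ((pv_suffix_single _).mp hcon))]
    rw [if_neg hs1]
    exact h1

-- ===== VERDICT (by name: the statement is the Claim_ definition above) =====
set_option maxHeartbeats 1000000 in
theorem text_to_label_spec : Claim_equal_text_to_label := by
  intro value _
  unfold Spec_text_to_label text_to_label text_to_label_alt
  dsimp only
  rw [show (fun (result : List String) (key : Char) =>
        if key == '%' then result ++ ["percent"]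
        else if PySem.Set.contains (PySem.Set.ofList ("abcdefghijklmnopqrstuvwxyz0123456789".toList)) key then result ++ [String.ofList [key]]
        else if result.length == 0 then result ++ ["_"]
        else if PySem.List.pyGet? result (-1) ≠ some "_" then result ++ ["_"]
        else result) = pvStepA from rfl]
  rcases hcc : (PySem.Str.lower (PySem.Str.strip value)).toList with _ | ⟨c, t⟩
  · rw [if_pos (show ((List.foldl pvStepA [] ([] : List Char)).length == 0) = true from rfl),
        if_pos (show (([] : List Char).isEmpty) = true from rfl)]
  · have hres := pv_main (c :: t) []
    rw [show ([] : List String).getLast? = none from rfl] at hres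
    rw [if_neg (by simp)] at hres
    rw [show pvJ [] = [] from rfl] at hres
    rw [List.nil_append] at hres
    have hLne : pvSub (pvExpand (c :: t)) ≠ [] := pv_sub_ne_nil _ (by simp)
    have hresne : List.foldl pvStepA [] (c :: t) ≠ [] := by
      intro hh
      apply hLne
      rw [← hres, hh]
      rfl
    rw [if_neg (show ¬(((List.foldl pvStepA [] (c :: t)).length == 0) = true) from by intro h; simp at h; exact hresne h)]
    rw [if_neg (show ¬((((c :: t) : List Char).isEmpty) = true) from by simp)]
    have hchain : List.IsChain pvR (pvSub (pvExpand (c :: t))) := pv_chain _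
    have h0 : (PySem.Str.join "" (List.foldl pvStepA [] (c :: t))).toList = pvSub (pvExpand (c :: t)) := by
      rw [PySem.Str.toList_join, show ("" : String).toList = [] from rfl, pv_join]
      exact hres
    have hB : (PySem.Str.stripChars (String.ofList (pvSub ((PySem.Str.replace (PySem.Str.lower (PySem.Str.strip value)) "%" "percent").toList))) "_").toList
        = PySem.Chars.stripChars (pvSub (pvExpand (c :: t))) ['_'] := by
      rw [PySem.Str.toList_stripChars, String.toList_ofList, show ("_" : String).toList = ['_'] from rfl]
      rw [PySem.Str.toList_replace, hcc]
      rw [show ("%" : String).toList = ['%'] from rfl]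
      rw [pv_replace]
    have hAB := (pv_aux (PySem.Str.join "" (List.foldl pvStepA [] (c :: t))) (pvSub (pvExpand (c :: t))) h0 hchain).trans hB.symm
    rw [String.toList_inj.mp hAB]
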